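-- pv_equiv track=rewrite | github.com/philipdexter/aoc | 2019/18/2.py | steps_to_locks
-- ===== SOURCE A (Python) =====
-- def is_door(c):
--   return c >= 'A' and c <= 'Z'
--
-- def is_key(c):
--   return c >= 'a' and c <= 'z'
--
-- def dirs_of(p):
--   return [(p[0], p[1] + 1),
--           (p[0], p[1] - 1),
--           (p[0] + 1, p[1]),
--           (p[0] - 1, p[1]),]
--
-- def steps_to_locks(items, start, end):
--
--   STACK = [(start, end, 0, [], [])]
--
--   res = []
--
--   while STACK:
--     start, end, total_steps, locks, been = STACK.pop()
--
--     if start == end: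
--       res.append((locks, total_steps))
--       continue
--
--     i = items.get(start)
--     if is_door(i):
--       locks = locks + [i.lower()]
--     elif not is_key(i):
--       if i not in ['.', '@']:
--         continue
--
--     been_now = been + [start]
--     for d in dirs_of(start):
--       if d not in been:
--         if items.get(d) != '#':
--           STACK.append((d, end, total_steps+1, locks, been_now))
--
--   return res
-- ===== SOURCE B (Python) =====
-- def is_door(c):
--   return c >= 'A' and c <= 'Z'
--
-- def is_key(c):
--   return c >= 'a' and c <= 'z'
--
-- def dirs_of(p):
--   return [(p[0], p[1] + 1),
--           (p[0], p[1] - 1),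
--           (p[0] + 1, p[1]),
--           (p[0] - 1, p[1]),]
--
-- def steps_to_locks(items, start, end):
--   res = []
--
--   def dfs(pos, total_steps, locks, been):
--     if pos == end:
--       res.append((locks, total_steps))
--       return
--     i = items.get(pos)
--     if is_door(i):
--       locks = locks + [i.lower()]
--     elif not is_key(i):
--       if i not in ('.', '@'):
--         return
--     been_now = been + [pos]
--     for d in reversed(dirs_of(pos)):
--       if d not in been and items.get(d) != '#':
--         dfs(d, total_steps + 1, locks, been_now)
--
--   dfs(start, 0, [], [])
--   return res
-- ===== Notes on version B (the rewrite author's own statement) =====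
-- stated objective: simpler
-- what changed: Replaces the explicit-stack while loop carrying 5-tuples with a direct recursive DFS helper that appends to a shared result list, iterating neighbours in reversed direction order to reproduce the stack's LIFO output order.
import Mathlib
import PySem

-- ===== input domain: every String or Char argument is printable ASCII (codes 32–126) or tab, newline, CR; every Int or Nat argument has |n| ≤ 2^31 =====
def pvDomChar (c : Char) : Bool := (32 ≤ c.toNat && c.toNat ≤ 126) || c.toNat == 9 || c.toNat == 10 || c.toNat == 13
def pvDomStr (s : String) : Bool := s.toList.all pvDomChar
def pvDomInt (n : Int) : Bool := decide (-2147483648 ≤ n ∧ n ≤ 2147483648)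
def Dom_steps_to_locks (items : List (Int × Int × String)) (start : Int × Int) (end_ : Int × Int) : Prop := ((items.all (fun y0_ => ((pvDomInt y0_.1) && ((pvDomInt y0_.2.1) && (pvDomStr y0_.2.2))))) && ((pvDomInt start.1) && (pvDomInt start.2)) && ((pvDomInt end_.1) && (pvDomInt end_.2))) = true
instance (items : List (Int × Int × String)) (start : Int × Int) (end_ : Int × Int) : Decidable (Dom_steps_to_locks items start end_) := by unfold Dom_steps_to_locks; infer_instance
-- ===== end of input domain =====

-- B rewrites the explicit-stack while loop as a recursive DFS (neighbours in reversed order to keep the LIFO output order); return values only, no argument is mutated.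

-- shared module helpers of Source A / Source B
def isDoorS (c : String) : Bool := !(decide (c.toList < "A".toList)) && !(decide ("Z".toList < c.toList))

def isKeyS (c : String) : Bool := !(decide (c.toList < "a".toList)) && !(decide ("z".toList < c.toList))

def dirsOf (p : Int × Int) : List (Int × Int) :=
  [(p.1, p.2 + 1), (p.1, p.2 - 1), (p.1 + 1, p.2), (p.1 - 1, p.2)]

-- the harness passes `items` to Python as dict(...) built from the triples in order
def toItems (items : List (Int × Int × String)) : PySem.Dict (Int × Int) String :=
  PySem.Dict.ofList (items.map (fun t => ((t.1, t.2.1), t.2.2)))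

abbrev FrameA := Nat × (Int × Int) × Int × List String × List (Int × Int)

-- lemmas cited by goA's decreasing_by (the Python while loop terminates because `been` grows along a simple path)
lemma push_measure_le {p : (Int × Int) → Prop} [DecidablePred p] (mk : (Int × Int) → FrameA)
    (f : Nat) (hmk : ∀ d, (mk d).1 = f) (l : List (Int × Int)) (rest : List FrameA) :
    (List.map (fun fr => 5 ^ fr.1) (l.foldl (fun s d => if p d then mk d :: s else s) rest)).sum
      ≤ l.length * 5 ^ f + (List.map (fun fr => 5 ^ fr.1) rest).sum := by
  induction l generalizing rest with
  | nil => simp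
  | cons a t ih =>
    simp only [List.foldl_cons, List.length_cons]
    by_cases h : p a
    · rw [if_pos h]
      have hthis := ih (mk a :: rest)
      simp only [List.map_cons, List.sum_cons, hmk a] at hthis
      have : (t.length + 1) * 5 ^ f = t.length * 5 ^ f + 5 ^ f := by ring
      omega
    · rw [if_neg h]
      have hthis := ih rest
      have : t.length * 5 ^ f ≤ (t.length + 1) * 5 ^ f := Nat.mul_le_mul_right _ (Nat.le_succ _)
      omega

lemma push_measure_lt {p : (Int × Int) → Prop} [DecidablePred p] (mk : (Int × Int) → FrameA)
    (f : Nat) (hmk : ∀ d, (mk d).1 = f) (l : List (Int × Int)) (hl : l.length ≤ 4)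
    (rest : List FrameA) :
    (List.map (fun fr => 5 ^ fr.1) (l.foldl (fun s d => if p d then mk d :: s else s) rest)).sum
      < 5 ^ (f + 1) + (List.map (fun fr => 5 ^ fr.1) rest).sum := by
  have h := push_measure_le (p := p) mk f hmk l rest
  have h1 : 0 < 5 ^ f := pow_pos (by norm_num) f
  have h2 : l.length * 5 ^ f ≤ 4 * 5 ^ f := Nat.mul_le_mul_right _ hl
  have h3 : (4 : Nat) * 5 ^ f < 5 * 5 ^ f := by nlinarith
  have hp : (5 : Nat) ^ (f + 1) = 5 * 5 ^ f := by rw [pow_succ]; ring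
  omega

-- ===== PORT A =====
-- the Python while loop over STACK; the Lean list's head is the Python list's end (append = cons, pop = head).
-- `fuel` in a frame is only a totality guard (a bound on how much `been` can still grow); it never runs out
-- on inputs satisfying Pre_ (there been is a duplicate-free list of dict keys, so |been| ≤ items.length).
def goA (D : PySem.Dict (Int × Int) String) (end_ : Int × Int) :
    List FrameA → List (List String × Int) → List (List String × Int)
  | [], res => res
  | (fuel, pos, steps, locks, been) :: rest, res =>
    if pos = end_ then
      goA D end_ rest (res ++ [(locks, steps)])
    else
      match D.get? pos with
      | none => goA D end_ rest res  -- Python raises TypeError (None cell) here; excluded by Pre_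
      | some c =>
        let locks' := if isDoorS c then locks ++ [PySem.Str.lower c] else locks
        if isDoorS c || isKeyS c || c == "." || c == "@" then  -- the if/elif chain proceeds exactly on these
          match fuel with
          | 0 => goA D end_ rest res  -- fuel guard only, never reached under Pre_
          | Nat.succ f =>
            goA D end_
              ((dirsOf pos).foldl
                (fun s d =>
                  if !been.contains d && !(D.get? d == some "#") then
                    (f, d, steps + 1, locks', been ++ [pos]) :: s
                  else s)
                rest)
              res
        else goA D end_ rest res
  termination_by stack _ => (stack.map (fun fr => 5 ^ fr.1)).sum
  decreasing_by
  all_goals first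
  | (simp
     done)
  | (simp
     omega)
  | (simp
     exact push_measure_lt _ f (fun d => rfl) _ (by simp [dirsOf]) rest)

def steps_to_locks (items : List (Int × Int × String)) (start : Int × Int) (end_ : Int × Int) :
    List (List String × Int) :=
  goA (toItems items) end_ [(items.length + 1, start, 0, [], [])] []

-- ===== PORT B =====
-- Source B's recursive dfs, returning the appended results; same fuel-only totality guard as goA.
def dfsB (D : PySem.Dict (Int × Int) String) (end_ : Int × Int) :
    Nat → (Int × Int) → Int → List String → List (Int × Int) → List (List String × Int)
  | fuel, pos, steps, locks, been =>
    if pos = end_ then [(locks, steps)]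
    else
      match D.get? pos with
      | none => []  -- Python Source B raises TypeError (None cell) here; excluded by Pre_
      | some c =>
        let locks' := if isDoorS c then locks ++ [PySem.Str.lower c] else locks
        if isDoorS c || isKeyS c || c == "." || c == "@" then
          match fuel with
          | 0 => []  -- fuel guard only, never reached under Pre_
          | Nat.succ f =>
            ((dirsOf pos).reverse).foldl
              (fun acc d =>
                if !been.contains d && !(D.get? d == some "#") then
                  acc ++ dfsB D end_ f d (steps + 1) locks' (been ++ [pos])
                else acc)
              []
        else []
  termination_by f _ _ _ _ => f
  decreasing_by omega

def steps_to_locks_alt (items : List (Int × Int × String)) (start : Int × Int) (end_ : Int × Int) :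
    List (List String × Int) :=
  dfsB (toItems items) end_ (items.length + 1) start 0 [] []

-- ===== PRECONDITION & SPEC =====
-- a cell at which the traversal keeps expanding: present in the dict and a door, a key, '.' or '@'
def passableB (D : PySem.Dict (Int × Int) String) (p : Int × Int) : Bool :=
  match D.get? p with
  | some c => isDoorS c || isKeyS c || c == "." || c == "@"
  | none => false

-- one frontier expansion of grid reachability: from every reached passable cell other than end_,
-- add its non-'#' neighbours (this is plain graph reachability over the input, not the DFS)
def reachStep (D : PySem.Dict (Int × Int) String) (end_ : Int × Int)
    (R : List (Int × Int)) : List (Int × Int) :=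
  R.foldl
    (fun acc p =>
      if p ≠ end_ ∧ passableB D p then
        (dirsOf p).foldl
          (fun a d => if !(D.get? d == some "#") && !a.contains d then a ++ [d] else a)
          acc
      else acc)
    R

-- the set of cells the traversal ever visits = cells reachable from start through passable cells,
-- stopping at end_; items.length + 2 frontier expansions reach the fixpoint (distance ≤ |keys| + 1)
def reachedCells (items : List (Int × Int × String)) (start : Int × Int) (end_ : Int × Int) :
    List (Int × Int) :=
  (reachStep (toItems items) end_)^[items.length + 2] [start]

-- Pre_ excludes exactly the inputs on which Python's A (and B) raises TypeError: those where the
-- traversal visits a cell that is missing from `items` and is not end_ (there items.get returns None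
-- and `None >= 'A'` raises). On every other input A returns normally and the claim covers it.
def Pre_steps_to_locks (items : List (Int × Int × String)) (start : Int × Int) (end_ : Int × Int) : Prop :=
  ∀ p ∈ reachedCells items start end_, p = end_ ∨ (toItems items).get? p ≠ none

instance (items : List (Int × Int × String)) (start : Int × Int) (end_ : Int × Int) :
    Decidable (Pre_steps_to_locks items start end_) := by unfold Pre_steps_to_locks; infer_instance

def pvWitness_steps_to_locks : (List (Int × Int × String)) × (Int × Int) × (Int × Int) :=
  ([(0, 0, "@"), (0, 1, "#"), (0, -1, "#"), (1, 0, "#"), (-1, 0, "#")], (0, 0), (5, 5))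

def Spec_steps_to_locks (items : List (Int × Int × String)) (start : Int × Int) (end_ : Int × Int) (out : List (List String × Int)) : Prop := out = steps_to_locks_alt items start end_
instance (items : List (Int × Int × String)) (start : Int × Int) (end_ : Int × Int) (out : List (List String × Int)) : Decidable (Spec_steps_to_locks items start end_ out) := by unfold Spec_steps_to_locks; infer_instance

-- ===== CLAIM (what is proved, stated in full; the proofs are below) =====
def Claim_equal_steps_to_locks : Prop := ∀ (items : List (Int × Int × String)) (start : Int × Int) (end_ : Int × Int), Dom_steps_to_locks items start end_ → Pre_steps_to_locks items start end_ → Spec_steps_to_locks items start end_ (steps_to_locks items start end_)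

-- ===== LEMMAS AND PROOFS =====

-- loop-shape lemmas used by the stack-vs-recursion bridge proof
lemma foldl_cons_ite {α β : Type} (p : α → Prop) [DecidablePred p] (mk : α → β) (l : List α)
    (st : List β) :
    l.foldl (fun s d => if p d then mk d :: s else s) st
      = ((l.filter (fun d => decide (p d))).map mk).reverse ++ st := by
  induction l generalizing st with
  | nil => rfl
  | cons a t ih => by_cases h : p a <;> simp [List.foldl_cons, h, ih, List.append_assoc]

lemma foldr_append_ite {α β : Type} (p : α → Prop) [DecidablePred p] (g : α → List β) (l : List α) :
    l.foldr (fun x y => if p x then y ++ g x else y) []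
      = (((l.filter (fun d => decide (p d))).map g).reverse).flatten := by
  induction l with
  | nil => rfl
  | cons a t ih => by_cases h : p a <;> simp [h, ih]

-- branch-wise unfolding lemmas for dfsB
lemma dfsB_end (D : PySem.Dict (Int × Int) String) (end_ : Int × Int) (fuel : Nat) (steps : Int)
    (locks : List String) (been : List (Int × Int)) :
    dfsB D end_ fuel end_ steps locks been = [(locks, steps)] := by
  rw [dfsB]; simp

lemma dfsB_none (D : PySem.Dict (Int × Int) String) (end_ pos : Int × Int) (fuel : Nat) (steps : Int)
    (locks : List String) (been : List (Int × Int)) (h : ¬ pos = end_) (hn : D.get? pos = none) :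
    dfsB D end_ fuel pos steps locks been = [] := by
  rw [dfsB]; simp [h, hn]

lemma dfsB_stuck (D : PySem.Dict (Int × Int) String) (end_ pos : Int × Int) (fuel : Nat) (steps : Int)
    (locks : List String) (been : List (Int × Int)) (c : String) (h : ¬ pos = end_)
    (hc : D.get? pos = some c) (hp : ¬ (isDoorS c || isKeyS c || c == "." || c == "@") = true) :
    dfsB D end_ fuel pos steps locks been = [] := by
  rw [dfsB]; simp [h, hc, hp]

lemma dfsB_fuel0 (D : PySem.Dict (Int × Int) String) (end_ pos : Int × Int) (steps : Int)
    (locks : List String) (been : List (Int × Int)) (c : String) (h : ¬ pos = end_)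
    (hc : D.get? pos = some c) (hp : (isDoorS c || isKeyS c || c == "." || c == "@") = true) :
    dfsB D end_ 0 pos steps locks been = [] := by
  rw [dfsB]; simp [h, hc, hp]

lemma dfsB_push (D : PySem.Dict (Int × Int) String) (end_ pos : Int × Int) (f : Nat) (steps : Int)
    (locks : List String) (been : List (Int × Int)) (c : String) (h : ¬ pos = end_)
    (hc : D.get? pos = some c) (hp : (isDoorS c || isKeyS c || c == "." || c == "@") = true) :
    dfsB D end_ (f + 1) pos steps locks been =
      ((dirsOf pos).reverse).foldl
        (fun acc d =>
          if !been.contains d && !(D.get? d == some "#") then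
            acc ++ dfsB D end_ f d (steps + 1)
              (if isDoorS c then locks ++ [PySem.Str.lower c] else locks) (been ++ [pos])
          else acc)
        [] := by
  rw [dfsB]; simp [h, hc, hp]

-- stack-vs-recursion bridge: draining the stack produces each frame's DFS results in order
lemma goA_eq_flatten (D : PySem.Dict (Int × Int) String) (end_ : Int × Int) :
    ∀ (stack : List FrameA) (res : List (List String × Int)),
      goA D end_ stack res
        = res ++ (stack.map (fun fr => dfsB D end_ fr.1 fr.2.1 fr.2.2.1 fr.2.2.2.1 fr.2.2.2.2)).flatten := by
  intro stack res
  induction stack, res using goA.induct D end_ with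
  | case1 res => rw [goA]; simp
  | case2 fuel steps locks been rest res ih =>
    rw [goA]
    simp [ih, dfsB_end, List.append_assoc]
  | case3 fuel pos steps locks been rest res h hn ih =>
    rw [goA]
    simp [h, hn, ih, dfsB_none D end_ pos fuel steps locks been h hn]
  | case4 pos steps locks been rest res h c hc hp ih =>
    rw [goA]
    simp [h, hc, hp, ih, dfsB_fuel0 D end_ pos steps locks been c h hc hp]
  | case5 pos steps locks been rest res h c hc locks' hp f ih =>
    rw [goA]
    simp [h, hc, hp, dfsB_push D end_ pos f steps locks been c h hc hp]
    simp at ih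
    rw [show locks' = (if isDoorS c = true then locks ++ [PySem.Str.lower c] else locks) from rfl] at ih
    rw [ih, foldl_cons_ite, foldr_append_ite]
    simp
    rfl
  | case6 fuel pos steps locks been rest res h c hc hp ih =>
    rw [goA]
    simp [h, hc, hp, ih, dfsB_stuck D end_ pos fuel steps locks been c h hc hp]

-- ===== VERDICT (by name: the statement is the Claim_ definition above) =====
theorem steps_to_locks_spec : Claim_equal_steps_to_locks := by
  intro items start end_ _ _
  unfold Spec_steps_to_locks steps_to_locks steps_to_locks_alt
  rw [goA_eq_flatten]
  simp
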